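-- pv_equiv track=rewrite | github.com/beathustler86/AI-Generator | tools/fix_view_and_switch_indent.py | fix_view_telemetry
-- ===== SOURCE A (Python) =====
-- def leading_ws(s: str) -> str:
-- 	return s[:len(s) - len(s.lstrip("\t "))]
--
-- def rewrite_method_block(lines, start_idx, class_indent):
-- 	# start_idx points at "def ...(" line (class-level). Return (new_lines, end_idx)
-- 	# We will ensure header line keeps class_indent, body lines get class_indent + "\t"
-- 	i = start_idx
-- 	n = len(lines)
-- 	out = []
-- 	# header
-- 	out.append(class_indent + lines[i].lstrip())
-- 	i += 1
-- 	# body until next class-level def or EOF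
-- 	while i < n:
-- 		ln = lines[i]
-- 		ws = leading_ws(ln)
-- 		# stop when we hit another def at class level
-- 		if ln.lstrip().startswith("def ") and ws == class_indent:
-- 			break
-- 		# blank lines remain blank (single newline)
-- 		if ln.strip() == "":
-- 			out.append("\n")
-- 			i += 1
-- 			continue
-- 		# compute content (strip any leading whitespace)
-- 		content = ln.lstrip().rstrip("\r\n")
-- 		# indent body one level deeper than class
-- 		out.append(class_indent + "\t" + content + "\n")
-- 		i += 1
-- 	return out, i
--
-- def fix_view_telemetry(lines, class_idx, class_indent):
-- 	# find def view_telemetry at class level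
-- 	for i in range(class_idx+1, len(lines)):
-- 		if lines[i].lstrip().startswith("def view_telemetry(") and leading_ws(lines[i]) == class_indent:
-- 			start = i
-- 			new_block, end = rewrite_method_block(lines, start, class_indent)
-- 			if new_block:
-- 				# replace
-- 				lines[start:end] = new_block
-- 				return True
-- 	return False
-- ===== SOURCE B (Python) =====
-- # Single linear pass with a state machine (copy / rewrite modes) instead of find-then-slice-replace.
-- # Mutates `lines` in place like A; for class_idx < -1 (A's negative-index wraparound scan) the
-- # returned bool still matches A, though the in-place rewrite may pick a different occurrence.
-- def _indent(s):
-- 	i = 0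
-- 	while i < len(s) and s[i] in "\t ":
-- 		i += 1
-- 	return s[:i]
--
-- def fix_view_telemetry(lines, class_idx, class_indent):
-- 	out = []
-- 	found = False
-- 	rewriting = False
-- 	for j, ln in enumerate(lines):
-- 		if rewriting:
-- 			if ln.lstrip().startswith("def ") and _indent(ln) == class_indent:
-- 				rewriting = False
-- 				out.append(ln)
-- 			elif ln.strip() == "":
-- 				out.append("\n")
-- 			else:
-- 				out.append(class_indent + "\t" + ln.lstrip().rstrip("\r\n") + "\n")
-- 		elif (not found and j > class_idx
-- 				and ln.lstrip().startswith("def view_telemetry(")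
-- 				and _indent(ln) == class_indent):
-- 			found = True
-- 			rewriting = True
-- 			out.append(class_indent + ln.lstrip())
-- 		else:
-- 			out.append(ln)
-- 	lines[:] = out
-- 	return found
-- ===== Notes on version B (the rewrite author's own statement) =====
-- stated objective: alternative
-- what changed: Replaced A's find-then-slice-replace (an index search loop that calls a separate rewrite helper and splices its result back) with a single linear state-machine pass that copies lines, flips into rewrite mode at the first class-level 'def view_telemetry(' past class_idx, and flips back at the next class-level def; the return value is proved equal, and the in-place mutation coincides for class_idx >= -1.
import Mathlib
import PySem

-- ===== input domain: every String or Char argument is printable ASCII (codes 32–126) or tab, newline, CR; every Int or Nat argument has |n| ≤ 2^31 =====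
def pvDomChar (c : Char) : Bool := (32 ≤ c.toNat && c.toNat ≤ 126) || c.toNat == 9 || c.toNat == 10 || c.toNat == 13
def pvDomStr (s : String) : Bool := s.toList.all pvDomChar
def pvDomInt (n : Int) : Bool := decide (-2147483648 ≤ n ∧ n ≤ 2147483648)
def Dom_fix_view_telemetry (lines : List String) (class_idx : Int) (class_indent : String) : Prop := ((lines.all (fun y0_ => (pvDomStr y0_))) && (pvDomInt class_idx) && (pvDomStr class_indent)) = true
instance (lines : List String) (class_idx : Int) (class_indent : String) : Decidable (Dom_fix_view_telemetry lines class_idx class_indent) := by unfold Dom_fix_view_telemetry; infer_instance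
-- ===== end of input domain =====

-- B replaces A's find-then-slice-replace with one linear state-machine pass over the lines;
-- the theorems are about the RETURN value only (both Pythons also mutate `lines` in place;
-- the rewritten list coincides for class_idx ≥ -1, see Source B's header).


-- shared exact hand port of s.rstrip("\r\n") (PySem has no rstrip with a char-set argument):
-- drop the trailing characters of the two-char set
def pvRstripCRLF (s : String) : String :=
  String.ofList ((s.toList.reverse.dropWhile (fun c => c == '\r' || c == '\n')).reverse)

-- ===== PORT A =====
-- exact hand port of s.lstrip("\t ") (dropWhile over the two-char set)
def pvLstripTabSpace (s : String) : String :=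
  String.ofList (s.toList.dropWhile (fun c => c == '\t' || c == ' '))

-- leading_ws(s) = s[:len(s) - len(s.lstrip("\t "))]
def pvLeadingWs (s : String) : String :=
  PySem.Str.slice s none (some (PySem.Str.len s - PySem.Str.len (pvLstripTabSpace s)))

-- the while-loop of rewrite_method_block (fuel = remaining distance to the end of lines)
def pvRewriteBody (lines : List String) (class_indent : String) :
    Nat → Int → List String → List String × Int
  | 0, i, out => (out, i)
  | fuel + 1, i, out =>
      if i < (lines.length : Int) then
        let ln := PySem.List.pyGetD lines i ""
        let ws := pvLeadingWs ln
        if PySem.Str.startswith (PySem.Str.lstrip ln) "def " && (ws == class_indent) then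
          (out, i)
        else if PySem.Str.strip ln == "" then
          pvRewriteBody lines class_indent fuel (i + 1) (out ++ ["\n"])
        else
          let content := pvRstripCRLF (PySem.Str.lstrip ln)
          pvRewriteBody lines class_indent fuel (i + 1)
            (out ++ [class_indent ++ "\t" ++ content ++ "\n"])
      else (out, i)

def pvRewriteMethodBlock (lines : List String) (start_idx : Int) (class_indent : String) :
    List String × Int :=
  pvRewriteBody lines class_indent ((lines.length : Int) - start_idx).toNat (start_idx + 1)
    [class_indent ++ PySem.Str.lstrip (PySem.List.pyGetD lines start_idx "")]

-- the 'for i in range(class_idx+1, len(lines))' search loop of A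
def pvFindLoop (lines : List String) (class_indent : String) : List Int → Bool
  | [] => false
  | i :: rest =>
      let ln := PySem.List.pyGetD lines i ""
      if PySem.Str.startswith (PySem.Str.lstrip ln) "def view_telemetry(" &&
          (pvLeadingWs ln == class_indent) then
        if (pvRewriteMethodBlock lines i class_indent).1 ≠ [] then true
        else pvFindLoop lines class_indent rest
      else pvFindLoop lines class_indent rest

def fix_view_telemetry (lines : List String) (class_idx : Int) (class_indent : String) : Bool :=
  pvFindLoop lines class_indent (PySem.List.pyRange (class_idx + 1) (lines.length : Int) 1)

-- ===== PORT B =====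
-- _indent's index-counting while loop, as a recursion over the characters carrying i
def pvIndentGo : List Char → Nat → Nat
  | [], i => i
  | c :: rest, i => if c == '\t' || c == ' ' then pvIndentGo rest (i + 1) else i

def pvIndent (s : String) : String :=
  PySem.Str.slice s none (some ((pvIndentGo s.toList 0 : Nat) : Int))

-- B's single pass: state = (index j, found flag, rewriting mode, output accumulator)
def pvScanB (class_idx : Int) (class_indent : String) :
    List String → Int → Bool → Bool → List String → Bool
  | [], _, found, _, _ => found
  | ln :: rest, j, found, rewriting, out =>
      if rewriting then
        if PySem.Str.startswith (PySem.Str.lstrip ln) "def " && (pvIndent ln == class_indent) then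
          pvScanB class_idx class_indent rest (j + 1) found false (out ++ [ln])
        else if PySem.Str.strip ln == "" then
          pvScanB class_idx class_indent rest (j + 1) found true (out ++ ["\n"])
        else
          pvScanB class_idx class_indent rest (j + 1) found true
            (out ++ [class_indent ++ "\t" ++ pvRstripCRLF (PySem.Str.lstrip ln) ++ "\n"])
      else if !found && decide (class_idx < j) &&
          PySem.Str.startswith (PySem.Str.lstrip ln) "def view_telemetry(" &&
          (pvIndent ln == class_indent) then
        pvScanB class_idx class_indent rest (j + 1) true true
          (out ++ [class_indent ++ PySem.Str.lstrip ln])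
      else
        pvScanB class_idx class_indent rest (j + 1) found rewriting (out ++ [ln])

def fix_view_telemetry_alt (lines : List String) (class_idx : Int) (class_indent : String) : Bool :=
  pvScanB class_idx class_indent lines 0 false false []

-- ===== PRECONDITION & SPEC =====
-- Pre_ excludes exactly the inputs where A raises IndexError (lines[i] with i < -len(lines),
-- reached when class_idx + 1 < -len(lines)); A returns on every other input.
def Pre_fix_view_telemetry (lines : List String) (class_idx : Int) (class_indent : String) : Prop :=
  -(lines.length : Int) ≤ class_idx + 1
instance (lines : List String) (class_idx : Int) (class_indent : String) : Decidable (Pre_fix_view_telemetry lines class_idx class_indent) := by unfold Pre_fix_view_telemetry; infer_instance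

def pvWitness_fix_view_telemetry : List String × Int × String := (["a"], 0, "")

def Spec_fix_view_telemetry (lines : List String) (class_idx : Int) (class_indent : String) (out : Bool) : Prop := out = fix_view_telemetry_alt lines class_idx class_indent
instance (lines : List String) (class_idx : Int) (class_indent : String) (out : Bool) : Decidable (Spec_fix_view_telemetry lines class_idx class_indent out) := by unfold Spec_fix_view_telemetry; infer_instance

-- ===== CLAIM (what is proved, stated in full; the proofs are below) =====
def Claim_equal_fix_view_telemetry : Prop := ∀ (lines : List String) (class_idx : Int) (class_indent : String), Dom_fix_view_telemetry lines class_idx class_indent → Pre_fix_view_telemetry lines class_idx class_indent → Spec_fix_view_telemetry lines class_idx class_indent (fix_view_telemetry lines class_idx class_indent)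

-- ===== LEMMAS AND PROOFS =====

-- the line predicate both searches test (stated with B's indent helper)
def pvMatch (class_indent : String) (ln : String) : Bool :=
  PySem.Str.startswith (PySem.Str.lstrip ln) "def view_telemetry(" && (pvIndent ln == class_indent)

theorem pvTake_takeWhile_length {α : Type} (l : List α) (q : α → Bool) :
    l.take (l.takeWhile q).length = l.takeWhile q := by
  calc l.take (l.takeWhile q).length
      = (l.takeWhile q ++ l.dropWhile q).take (l.takeWhile q).length := by
        rw [List.takeWhile_append_dropWhile]
    _ = l.takeWhile q := List.take_left' rfl

theorem pvIndentGo_eq (l : List Char) :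
    ∀ i : Nat, pvIndentGo l i = i + (l.takeWhile (fun c => c == '\t' || c == ' ')).length := by
  induction l with
  | nil => intro i; simp [pvIndentGo]
  | cons c rest ih =>
      intro i
      simp only [pvIndentGo]
      by_cases h : (c == '\t' || c == ' ') = true
      · rw [if_pos h, ih]
        simp [h]
        omega
      · rw [if_neg h]
        simp [h]

theorem pvLeadingWs_eq_pvIndent (s : String) : pvLeadingWs s = pvIndent s := by
  apply String.toList_inj.mp
  unfold pvLeadingWs pvIndent pvLstripTabSpace
  rw [PySem.Str.toList_slice, PySem.Str.toList_slice]
  simp only [PySem.Chars.slice_eq_listSlice, PySem.Str.len_eq, String.toList_ofList]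
  set L := s.toList with hL
  set q : Char → Bool := fun c => c == '\t' || c == ' ' with hq
  have hd : (L.dropWhile q).length ≤ L.length := List.length_dropWhile_le q L
  have htw : (L.takeWhile q).length + (L.dropWhile q).length = L.length := by
    rw [← List.length_append, List.takeWhile_append_dropWhile]
  rw [PySem.List.slice_to L (by omega), PySem.List.slice_to L (by positivity)]
  rw [pvIndentGo_eq L 0]
  have h1 : ((L.length : Int) - ((L.dropWhile q).length : Int)).toNat
      = (L.takeWhile q).length := by omega
  have h2 : ((0 + (L.takeWhile q).length : Nat) : Int).toNat = (L.takeWhile q).length := by omega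
  rw [h1, h2, pvTake_takeWhile_length]

theorem pvRewriteBody_fst_ne_nil (lines : List String) (ci : String) :
    ∀ fuel (i : Int) (out : List String), out ≠ [] →
      (pvRewriteBody lines ci fuel i out).1 ≠ [] := by
  intro fuel
  induction fuel with
  | zero => intro i out h; simpa [pvRewriteBody] using h
  | succ n ih =>
      intro i out h
      simp only [pvRewriteBody]
      split_ifs <;> first | simpa using h | (apply ih; simp)

theorem pvRewriteMethodBlock_fst_ne_nil {lines : List String} {i : Int} {ci : String} :
    (pvRewriteMethodBlock lines i ci).1 ≠ [] := by
  unfold pvRewriteMethodBlock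
  exact pvRewriteBody_fst_ne_nil _ _ _ _ _ (by simp)

theorem pvFindLoop_eq_any (lines : List String) (ci : String) (idxs : List Int) :
    pvFindLoop lines ci idxs = idxs.any (fun i => pvMatch ci (PySem.List.pyGetD lines i "")) := by
  induction idxs with
  | nil => simp [pvFindLoop]
  | cons i rest ih =>
      simp only [pvFindLoop, List.any_cons, ih, pvMatch, ← pvLeadingWs_eq_pvIndent]
      split_ifs with h1 h2
      · rw [h1, Bool.true_or]
      · exact absurd pvRewriteMethodBlock_fst_ne_nil h2
      · rw [Bool.eq_false_iff.mpr h1, Bool.false_or]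

def pvAnyIdx (c : Int) (p : String → Bool) : Int → List String → Bool
  | _, [] => false
  | j, ln :: rest => (decide (c < j) && p ln) || pvAnyIdx c p (j + 1) rest

theorem pvScanB_found (c : Int) (ci : String) :
    ∀ (rest : List String) (j : Int) (rw : Bool) (out : List String),
      pvScanB c ci rest j true rw out = true := by
  intro rest
  induction rest with
  | nil => intro j rw out; simp [pvScanB]
  | cons ln rest ih =>
      intro j rw out
      simp only [pvScanB]
      split_ifs <;> apply ih

theorem pvScanB_eq (c : Int) (ci : String) :
    ∀ (rest : List String) (j : Int) (out : List String),
      pvScanB c ci rest j false false out = pvAnyIdx c (pvMatch ci) j rest := by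
  intro rest
  induction rest with
  | nil => intro j out; simp [pvScanB, pvAnyIdx]
  | cons ln rest ih =>
      intro j out
      simp only [pvScanB, pvAnyIdx, if_neg (by simp : ¬(false = true)), Bool.not_false,
        Bool.true_and, pvMatch]
      by_cases h : (decide (c < j) && (PySem.Str.startswith (PySem.Str.lstrip ln) "def view_telemetry(" && (pvIndent ln == ci))) = true
      · rw [if_pos (by simpa [Bool.and_assoc] using h), pvScanB_found, h]; simp
      · rw [if_neg (by simpa [Bool.and_assoc] using h), ih]
        simp only [Bool.and_assoc] at h ⊢
        rw [Bool.eq_false_iff.mpr h, Bool.false_or]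

theorem pvAnyIdx_iff (c : Int) (p : String → Bool) :
    ∀ (ls : List String) (j : Int),
      pvAnyIdx c p j ls = true ↔ ∃ k : Nat, ∃ h : k < ls.length, c < j + k ∧ p ls[k] = true := by
  intro ls
  induction ls with
  | nil => intro j; simp [pvAnyIdx]
  | cons ln rest ih =>
      intro j
      simp only [pvAnyIdx, Bool.or_eq_true, Bool.and_eq_true, decide_eq_true_eq, ih]
      constructor
      · rintro (⟨hc, hp⟩ | ⟨k, hk, hc, hp⟩)
        · exact ⟨0, by simp, by simpa using hc, by simpa using hp⟩
        · exact ⟨k + 1, by simpa using hk, by push_cast at hc ⊢; omega, by simpa using hp⟩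
      · rintro ⟨k, hk, hc, hp⟩
        cases k with
        | zero => exact Or.inl ⟨by simpa using hc, by simpa using hp⟩
        | succ k =>
            exact Or.inr ⟨k, by simpa using hk, by push_cast at hc ⊢; omega,
              by simpa using hp⟩

-- ===== VERDICT (by name: the statement is the Claim_ definition above) =====
theorem fix_view_telemetry_spec : Claim_equal_fix_view_telemetry := by
  intro lines class_idx class_indent _hDom hPre
  unfold Spec_fix_view_telemetry
  unfold Pre_fix_view_telemetry at hPre
  show fix_view_telemetry lines class_idx class_indent = _
  unfold fix_view_telemetry fix_view_telemetry_alt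
  rw [pvFindLoop_eq_any, pvScanB_eq]
  rw [Bool.eq_iff_iff, List.any_eq_true, pvAnyIdx_iff]
  constructor
  · rintro ⟨i, hmem, hp⟩
    rw [PySem.List.mem_pyRange_one] at hmem
    obtain ⟨hle, hlt⟩ := hmem
    by_cases h0 : 0 ≤ i
    · refine ⟨i.toNat, by omega, by omega, ?_⟩
      rwa [PySem.List.pyGetD_eq_getElem lines "" h0 hlt] at hp
    · have hk1 : 0 < (-i).toNat := by omega
      have hk2 : (-i).toNat ≤ lines.length := by omega
      have : i = -((-i).toNat : Int) := by omega
      rw [this, PySem.List.pyGetD_neg_natCast lines (-i).toNat "" hk1 hk2] at hp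
      exact ⟨lines.length - (-i).toNat, by omega, by push_cast; omega, hp⟩
  · rintro ⟨k, hk, hc, hp⟩
    refine ⟨(k : Int), ?_, ?_⟩
    · rw [PySem.List.mem_pyRange_one]; omega
    · have h1 := PySem.List.pyGetD_eq_getElem lines "" (i := (k : Int)) (by omega)
        (by exact_mod_cast hk)
      rw [h1]
      simpa using hp
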